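-- pv_equiv track=rewrite | github.com/shubhamg31/CS221 | cuisineClassifier/classifyCuisine.py | constructFeatureVector
-- ===== SOURCE A (Python) =====
-- def constructFeatureVector(ingredients, ingredientSet):
-- 	featureVector = [0] * len(ingredientSet)
-- 	for index, ingredient in enumerate(ingredientSet):
-- 		if ingredient in ingredients:
-- 			featureVector[index] = 1
-- 		else:
-- 			featureVector[index] = 0
-- 	return featureVector
-- ===== SOURCE B (Python) =====
-- def constructFeatureVector(ingredients, ingredientSet):
-- 	index = {}
-- 	for i, ingredient in enumerate(ingredientSet):
-- 		index.setdefault(ingredient, []).append(i)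
-- 	featureVector = [0] * len(ingredientSet)
-- 	for ingredient in ingredients:
-- 		for i in index.get(ingredient, []):
-- 			featureVector[i] = 1
-- 	return featureVector
-- ===== Notes on version B (the rewrite author's own statement) =====
-- stated objective: faster
-- what changed: B builds a value-to-positions index of ingredientSet once and then loops over ingredients marking listed slots 1, instead of A's per-slot 'in ingredients' linear membership scan.
import Mathlib
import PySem

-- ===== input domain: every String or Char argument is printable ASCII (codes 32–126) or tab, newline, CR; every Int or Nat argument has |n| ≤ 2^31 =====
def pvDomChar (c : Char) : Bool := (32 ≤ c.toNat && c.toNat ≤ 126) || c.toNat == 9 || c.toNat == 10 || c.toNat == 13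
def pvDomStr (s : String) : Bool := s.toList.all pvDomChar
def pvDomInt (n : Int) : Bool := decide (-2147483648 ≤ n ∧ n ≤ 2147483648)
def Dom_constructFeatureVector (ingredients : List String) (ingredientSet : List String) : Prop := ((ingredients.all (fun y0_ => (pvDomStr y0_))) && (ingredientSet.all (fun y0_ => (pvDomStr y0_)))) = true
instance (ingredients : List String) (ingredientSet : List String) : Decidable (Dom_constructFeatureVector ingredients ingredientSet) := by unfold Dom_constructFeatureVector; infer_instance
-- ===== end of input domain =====

-- ===== PORT A =====
-- B replaces A's per-slot membership scan by a positions index built once; objective: faster (index lookup instead of a linear 'in' test per slot).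
def constructFeatureVector (ingredients : List String) (ingredientSet : List String) : List Int :=
  let featureVector := List.replicate ingredientSet.length (0 : Int)
  (PySem.List.enumerate ingredientSet).foldl
    (fun fv p =>
      if ingredients.contains p.2 then PySem.List.pySetD fv p.1 1
      else PySem.List.pySetD fv p.1 0)
    featureVector

-- ===== PORT B =====
-- index.setdefault(ing, []).append(i)  ==  d.modify ing [] (· ++ [i])
def pvIndex (ingredientSet : List String) : PySem.Dict String (List Int) :=
  (PySem.List.enumerate ingredientSet).foldl
    (fun d p => d.modify p.2 [] (fun l => l ++ [p.1])) PySem.Dict.empty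

def constructFeatureVector_alt (ingredients : List String) (ingredientSet : List String) : List Int :=
  let index := pvIndex ingredientSet
  let featureVector := List.replicate ingredientSet.length (0 : Int)
  ingredients.foldl
    (fun fv ing => (index.getD ing []).foldl (fun fv i => PySem.List.pySetD fv i 1) fv)
    featureVector

-- ===== PRECONDITION & SPEC =====
def Spec_constructFeatureVector (ingredients : List String) (ingredientSet : List String) (out : List Int) : Prop := out = constructFeatureVector_alt ingredients ingredientSet
instance (ingredients : List String) (ingredientSet : List String) (out : List Int) : Decidable (Spec_constructFeatureVector ingredients ingredientSet out) := by unfold Spec_constructFeatureVector; infer_instance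

-- ===== CLAIM (what is proved, stated in full; the proofs are below) =====
def Claim_equal_constructFeatureVector : Prop := ∀ (ingredients : List String) (ingredientSet : List String), Dom_constructFeatureVector ingredients ingredientSet → Spec_constructFeatureVector ingredients ingredientSet (constructFeatureVector ingredients ingredientSet)

-- ===== LEMMAS AND PROOFS =====

-- the common value both programs compute
def pvMapSpec (ingredients : List String) (ingredientSet : List String) : List Int :=
  ingredientSet.map (fun s => if ingredients.contains s then (1 : Int) else 0)

-- the positions (as they appear in pvIndex) of s in ss
def pvPositions (ss : List String) (s : String) : List Int :=
  (PySem.List.enumerate ss).filterMap (fun p => if p.2 = s then some p.1 else none)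

theorem pvA_fold (f : String → Int) (ss : List String) :
    ∀ (k : Nat) (acc : List Int), acc.length = k + ss.length →
    (PySem.List.enumerate ss (k : Int)).foldl
      (fun fv p => PySem.List.pySetD fv p.1 (f p.2)) acc = acc.take k ++ ss.map f := by
  induction ss with
  | nil =>
    intro k acc h
    simp only [List.length_nil, Nat.add_zero] at h
    simp [PySem.List.enumerate_nil, List.take_of_length_le h.le]
  | cons s ss ih =>
    intro k acc h
    rw [PySem.List.enumerate_cons]
    have hk : k < acc.length := by simp [h]
    have hcast : ((k : Int) + 1) = ((k + 1 : Nat) : Int) := by push_cast; ring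
    simp only [List.foldl_cons, PySem.List.pySetD_natCast, hcast]
    rw [ih (k + 1) (acc.set k (f s)) (by simp [h]; omega)]
    rw [List.take_add_one, List.getElem?_set_self']
    simp [List.take_set, List.getElem?_eq_getElem hk,
      List.set_eq_of_length_le (by simp : (List.take k acc).length ≤ k)]

theorem constructFeatureVector_eq_map (ingredients ss : List String) :
    constructFeatureVector ingredients ss = pvMapSpec ingredients ss := by
  unfold constructFeatureVector pvMapSpec
  have hfun : (fun (fv : List Int) (p : Int × String) =>
      if ingredients.contains p.2 then PySem.List.pySetD fv p.1 1
      else PySem.List.pySetD fv p.1 0)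
    = (fun fv p => PySem.List.pySetD fv p.1
        (if ingredients.contains p.2 then (1 : Int) else 0)) := by
    funext fv p; split <;> rfl
  simp only [hfun]
  have := pvA_fold (fun s => if ingredients.contains s then (1 : Int) else 0) ss 0
    (List.replicate ss.length 0) (by simp)
  simpa using this

theorem pv_idx_fold (l : List (Int × String)) :
    ∀ (d : PySem.Dict String (List Int)) (s : String),
    (l.foldl (fun d p => d.modify p.2 [] (fun ls => ls ++ [p.1])) d).getD s []
      = d.getD s [] ++ l.filterMap (fun p => if p.2 = s then some p.1 else none) := by
  induction l with
  | nil => intro d s; simp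
  | cons p l ih =>
    intro d s
    simp only [List.foldl_cons, List.filterMap_cons]
    by_cases h : p.2 = s
    · subst h
      rw [ih]
      simp [PySem.Dict.getD_modify_self]
    · rw [ih]
      simp [PySem.Dict.getD_modify_of_ne _ _ _ (Ne.symm h), h]

theorem pvIndex_getD (ss : List String) (s : String) :
    (pvIndex ss).getD s [] = pvPositions ss s := by
  unfold pvIndex pvPositions
  rw [pv_idx_fold]
  simp

theorem pv_mem_positions (ss : List String) (s : String) (j : Nat) (hj : j < ss.length) :
    ((j : Int) ∈ pvPositions ss s) ↔ ss[j] = s := by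
  simp only [pvPositions, List.mem_filterMap, PySem.List.mem_enumerate_iff]
  constructor
  · rintro ⟨p, ⟨k, hk, rfl⟩, hf⟩
    by_cases h : ss[k] = s
    · simp [h] at hf
      have : k = j := by omega
      subst this; exact h
    · simp [h] at hf
  · intro h
    exact ⟨((0 : Int) + j, ss[j]), ⟨j, hj, rfl⟩, by simp [h]⟩

theorem pv_positions_nonneg (ss : List String) (s : String) :
    ∀ i ∈ pvPositions ss s, ∃ k : Nat, i = (k : Int) ∧ k < ss.length := by
  intro i hi
  simp only [pvPositions, List.mem_filterMap, PySem.List.mem_enumerate_iff] at hi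
  obtain ⟨p, ⟨k, hk, rfl⟩, hf⟩ := hi
  refine ⟨k, ?_, hk⟩
  by_cases h : ss[k] = s
  · simp [h] at hf; omega
  · simp [h] at hf

theorem pv_setOnes_length (ps : List Int) (v : List Int) :
    (ps.foldl (fun fv i => PySem.List.pySetD fv i 1) v).length = v.length := by
  induction ps generalizing v with
  | nil => rfl
  | cons i ps ih => simp [List.foldl_cons, ih, PySem.List.length_pySetD]

theorem pv_setOnes_get (ps : List Int) :
    ∀ (v : List Int) (j : Nat),
    (∀ i ∈ ps, ∃ k : Nat, i = (k : Int) ∧ k < v.length) →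
    (ps.foldl (fun fv i => PySem.List.pySetD fv i 1) v)[j]? =
      if (j : Int) ∈ ps ∧ j < v.length then some 1 else v[j]? := by
  induction ps with
  | nil => intro v j _; simp
  | cons i ps ih =>
    intro v j hnn
    obtain ⟨k, rfl, hkv⟩ := hnn i List.mem_cons_self
    simp only [List.foldl_cons, PySem.List.pySetD_natCast]
    rw [ih (v.set k 1) j (by
      intro i hi
      obtain ⟨m, rfl, hm⟩ := hnn i (List.mem_cons_of_mem _ hi)
      exact ⟨m, rfl, by simpa using hm⟩)]
    by_cases hjp : (j : Int) ∈ ps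
    · simp only [hjp, List.mem_cons, or_true, true_and, List.length_set]
      split_ifs with h
      · rfl
      · rw [List.getElem?_set_ne (by omega : k ≠ j)]
    · by_cases hjk : j = k
      · subst hjk
        simp [hjp, hkv]
      · have hne : (j : Int) ≠ (k : Int) := by exact_mod_cast hjk
        simp [hjp, hne, List.getElem?_set_ne (by omega : k ≠ j), List.mem_cons]

theorem pv_outer_length (ss : List String) (xs : List String) (v : List Int) :
    (xs.foldl (fun fv ing => ((pvIndex ss).getD ing []).foldl
        (fun fv i => PySem.List.pySetD fv i 1) fv) v).length = v.length := by
  induction xs generalizing v with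
  | nil => rfl
  | cons x xs ih => simp [List.foldl_cons, ih, pv_setOnes_length]

theorem pv_outer (ss : List String) (xs : List String) :
    ∀ (v : List Int) (j : Nat), v.length = ss.length → j < v.length →
    (xs.foldl (fun fv ing => ((pvIndex ss).getD ing []).foldl
        (fun fv i => PySem.List.pySetD fv i 1) fv) v)[j]? =
      if ∃ x ∈ xs, (j : Int) ∈ pvPositions ss x then some 1 else v[j]? := by
  induction xs with
  | nil => intro v j _ _; simp
  | cons x xs ih =>
    intro v j hlen hj
    simp only [List.foldl_cons]
    rw [ih _ j (by rw [pv_setOnes_length]; exact hlen) (by rw [pv_setOnes_length]; exact hj)]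
    rw [pvIndex_getD, pv_setOnes_get _ v j (by
      intro i hi
      obtain ⟨m, rfl, hm⟩ := pv_positions_nonneg ss x i hi
      exact ⟨m, rfl, by omega⟩)]
    by_cases h1 : ∃ x' ∈ xs, (j : Int) ∈ pvPositions ss x'
    · have : ∃ x' ∈ x :: xs, (j : Int) ∈ pvPositions ss x' := by
        obtain ⟨y, hy, hjy⟩ := h1; exact ⟨y, List.mem_cons_of_mem _ hy, hjy⟩
      simp [h1, this]
    · by_cases h2 : (j : Int) ∈ pvPositions ss x
      · have : ∃ x' ∈ x :: xs, (j : Int) ∈ pvPositions ss x' :=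
          ⟨x, List.mem_cons_self, h2⟩
        simp [h1, h2, hj, this]
      · have : ¬ ∃ x' ∈ x :: xs, (j : Int) ∈ pvPositions ss x' := by
          rintro ⟨y, hy, hjy⟩
          rcases List.mem_cons.mp hy with rfl | hy'
          · exact h2 hjy
          · exact h1 ⟨y, hy', hjy⟩
        simp [h1, h2, this]

theorem constructFeatureVector_alt_eq_map (ingredients ss : List String) :
    constructFeatureVector_alt ingredients ss = pvMapSpec ingredients ss := by
  unfold constructFeatureVector_alt pvMapSpec
  dsimp only
  have hlen0 : (List.replicate ss.length (0 : Int)).length = ss.length := by simp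
  apply List.ext_getElem?
  intro j
  by_cases hj : j < ss.length
  · rw [pv_outer ss ingredients _ j hlen0 (by simpa using hj)]
    have hmem : (∃ x ∈ ingredients, (j : Int) ∈ pvPositions ss x) ↔ ss[j] ∈ ingredients := by
      constructor
      · rintro ⟨x, hx, hjx⟩
        rw [(pv_mem_positions ss x j hj).mp hjx]; exact hx
      · intro h; exact ⟨ss[j], h, (pv_mem_positions ss _ j hj).mpr rfl⟩
    rw [List.getElem?_map, List.getElem?_eq_getElem hj]
    by_cases h : ss[j] ∈ ingredients
    · simp [hmem, h, List.elem_iff]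
    · simp [hmem, h, List.elem_iff, hj]
  · have h1 : (ingredients.foldl (fun fv ing => ((pvIndex ss).getD ing []).foldl
        (fun fv i => PySem.List.pySetD fv i 1) fv) (List.replicate ss.length (0:Int))).length = ss.length :=
      (pv_outer_length ss ingredients _).trans hlen0
    rw [List.getElem?_eq_none (by rw [h1]; omega),
        List.getElem?_eq_none (by rw [List.length_map]; omega)]

-- ===== VERDICT (by name: the statement is the Claim_ definition above) =====
theorem constructFeatureVector_spec : Claim_equal_constructFeatureVector := by
  intro ingredients ingredientSet _
  unfold Spec_constructFeatureVector
  rw [constructFeatureVector_eq_map, constructFeatureVector_alt_eq_map]
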